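-- pv_equiv track=rewrite | github.com/zeduy1327/ICT2021 | FrontEnd/queryclass.py | makeStorable
-- ===== SOURCE A (Python) =====
-- def makeStorable(string):
--     index = 0
--     lastLocation = 0
--     returnString = ""
--     for char in string:
--         # Looks for single quotes
--         if char=="'":
--             # Adds a second single quote to the found single quote
--             returnString += string[lastLocation:index+1] + "'"
--             lastLocation = index+1
--         index+=1
--     returnString += string[lastLocation:len(string)]
--     # Returns the new string with all the additional single quotes
--     return returnString
-- ===== SOURCE B (Python) =====
-- def makeStorable(string):
--     return "''".join(string.split("'"))
-- ===== Notes on version B (the rewrite author's own statement) =====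
-- stated objective: idiomatic
-- what changed: Replaces A's index-tracked character sweep that appends slices between quote positions with a two-phase split-on-quote then join-with-doubled-quote.
import Mathlib
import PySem

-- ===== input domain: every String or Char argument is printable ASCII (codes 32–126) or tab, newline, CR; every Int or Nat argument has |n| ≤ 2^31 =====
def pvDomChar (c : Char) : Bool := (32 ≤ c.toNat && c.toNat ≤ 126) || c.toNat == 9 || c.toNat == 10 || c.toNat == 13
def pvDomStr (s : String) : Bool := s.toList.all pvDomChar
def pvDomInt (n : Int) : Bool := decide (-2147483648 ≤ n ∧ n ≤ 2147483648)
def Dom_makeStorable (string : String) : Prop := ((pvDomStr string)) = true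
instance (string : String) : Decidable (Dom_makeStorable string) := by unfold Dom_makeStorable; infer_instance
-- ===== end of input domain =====

-- B replaces A's index-tracked sweep appending slices with split-on-quote + join-with-doubled-quote (idiomatic two-phase decomposition).


-- ===== PORT A =====
-- one loop step: state (index, lastLocation, returnString); on a quote, append string[lastLocation:index+1] + "'"
def makeStorableStep (s : List Char) (st : Int × Int × List Char) (c : Char) : Int × Int × List Char :=
  if c = '\'' then
    (st.1 + 1, st.1 + 1, st.2.2 ++ PySem.List.slice s (some st.2.1) (some (st.1 + 1)) ++ ['\''])
  else (st.1 + 1, st.2.1, st.2.2)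

def makeStorable (string : String) : String :=
  let s := string.toList
  let st := s.foldl (makeStorableStep s) (0, 0, [])
  String.ofList (st.2.2 ++ PySem.List.slice s (some st.2.1) (some (s.length : Int)))

-- ===== PORT B =====
-- "''".join(string.split("'")); the separator "'" is nonempty, so Python's split is exactly Chars.splitOn
def makeStorable_alt (string : String) : String :=
  String.ofList (PySem.Chars.join "''".toList (PySem.Chars.splitOn string.toList "'".toList))

-- ===== PRECONDITION & SPEC =====
def Spec_makeStorable (string : String) (out : String) : Prop := out = makeStorable_alt string
instance (string : String) (out : String) : Decidable (Spec_makeStorable string out) := by unfold Spec_makeStorable; infer_instance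

-- ===== CLAIM (what is proved, stated in full; the proofs are below) =====
def Claim_equal_makeStorable : Prop := ∀ (string : String), Dom_makeStorable string → Spec_makeStorable string (makeStorable string)

-- ===== LEMMAS AND PROOFS =====

-- each char doubled if it is a single quote: the common value of both programs
def pvDbl (cs : List Char) : List Char := cs.flatMap (fun c => if c = '\'' then ['\'', '\''] else [c])

-- structural version of split on a single quote
def pvSplitQ : List Char → List (List Char)
  | [] => [[]]
  | c :: rest => if c = '\'' then [] :: pvSplitQ rest else (pvSplitQ rest).modifyHead (c :: ·)

lemma pvSplitQ_ne_nil (cs : List Char) : pvSplitQ cs ≠ [] := by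
  cases cs with
  | nil => simp [pvSplitQ]
  | cons c rest =>
    simp only [pvSplitQ]
    split_ifs
    · simp
    · cases h : pvSplitQ rest with
      | nil => exact absurd h (pvSplitQ_ne_nil rest)
      | cons x l => simp

lemma splitOn_go_eq (fuel : Nat) : ∀ (l cur : List Char) (acc : List (List Char)),
    l.length < fuel →
    PySem.Chars.splitOn.go ['\''] fuel l cur acc
      = acc.reverse ++ (pvSplitQ l).modifyHead (cur.reverse ++ ·) := by
  induction fuel with
  | zero => intro l cur acc h; omega
  | succ fuel ih =>
    intro l cur acc h
    cases l with
    | nil => simp [PySem.Chars.splitOn.go, pvSplitQ]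
    | cons c rest =>
      by_cases hc : c = '\''
      · subst hc
        rw [show PySem.Chars.splitOn.go ['\''] (fuel+1) ('\'' :: rest) cur acc
              = PySem.Chars.splitOn.go ['\''] fuel rest [] (cur.reverse :: acc) from by
            simp [PySem.Chars.splitOn.go, List.isPrefixOf]]
        rw [ih rest [] (cur.reverse :: acc) (by simpa using Nat.lt_of_succ_lt_succ h)]
        simp only [pvSplitQ, List.reverse_cons, List.reverse_nil, List.nil_append,
          List.modifyHead]
        cases hsp : pvSplitQ rest <;> simp
      · rw [show PySem.Chars.splitOn.go ['\''] (fuel+1) (c :: rest) cur acc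
              = PySem.Chars.splitOn.go ['\''] fuel rest (c :: cur) acc from by
            simp [PySem.Chars.splitOn.go, List.isPrefixOf, Ne.symm hc]]
        rw [ih rest (c :: cur) acc (by simpa using Nat.lt_of_succ_lt_succ h)]
        simp only [pvSplitQ, if_neg hc]
        obtain ⟨x, l', hx⟩ : ∃ x l', pvSplitQ rest = x :: l' := by
          cases hsp : pvSplitQ rest with
          | nil => exact absurd hsp (pvSplitQ_ne_nil rest)
          | cons x l' => exact ⟨x, l', rfl⟩
        simp [hx]

lemma splitOn_eq_pvSplitQ (cs : List Char) :
    PySem.Chars.splitOn cs ['\''] = pvSplitQ cs := by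
  have := splitOn_go_eq (cs.length + 1) cs [] [] (by omega)
  rw [PySem.Chars.splitOn, this]
  cases hsp : pvSplitQ cs <;> simp

lemma join_cons_of_ne_nil (sep x : List Char) (l : List (List Char)) (h : l ≠ []) :
    PySem.Chars.join sep (x :: l) = x ++ sep ++ PySem.Chars.join sep l := by
  cases l with
  | nil => exact absurd rfl h
  | cons y l' => simp [PySem.Chars.join, List.intercalate, List.intersperse]

lemma join_cons_head (sep x : List Char) (c : Char) (l : List (List Char)) :
    PySem.Chars.join sep ((c :: x) :: l) = c :: PySem.Chars.join sep (x :: l) := by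
  cases l with
  | nil => simp [PySem.Chars.join, List.intercalate, List.intersperse]
  | cons y l' =>
    rw [join_cons_of_ne_nil sep (c :: x) (y :: l') (by simp),
        join_cons_of_ne_nil sep x (y :: l') (by simp)]
    simp

lemma join_pvSplitQ (cs : List Char) :
    PySem.Chars.join ['\'', '\''] (pvSplitQ cs) = pvDbl cs := by
  induction cs with
  | nil => simp [pvSplitQ, pvDbl, PySem.Chars.join, List.intercalate]
  | cons c rest ih =>
    by_cases hc : c = '\''
    · subst hc
      rw [show pvSplitQ ('\'' :: rest) = [] :: pvSplitQ rest from by simp [pvSplitQ]]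
      rw [join_cons_of_ne_nil _ _ _ (pvSplitQ_ne_nil rest), ih]
      simp [pvDbl]
    · rw [show pvSplitQ (c :: rest) = (pvSplitQ rest).modifyHead (c :: ·) from by
        simp [pvSplitQ, hc]]
      obtain ⟨x, l', hx⟩ : ∃ x l', pvSplitQ rest = x :: l' := by
        cases hsp : pvSplitQ rest with
        | nil => exact absurd hsp (pvSplitQ_ne_nil rest)
        | cons x l' => exact ⟨x, l', rfl⟩
      rw [hx, List.modifyHead, join_cons_head, ← hx, ih]
      simp [pvDbl, hc]

-- take one more character past a known prefix
lemma take_succ_prefix (p t : List Char) (c : Char) (last : Nat) (h : last ≤ p.length) :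
    ((p ++ c :: t).drop last).take (p.length - last + 1)
      = ((p ++ c :: t).drop last).take (p.length - last) ++ [c] := by
  have hd : (p ++ c :: t).drop last = p.drop last ++ c :: t := by
    rw [List.drop_append_of_le_length h]
  rw [hd]
  have hl : (p.drop last).length = p.length - last := by simp
  rw [← hl, List.take_append, List.take_left]
  simp

-- A-loop invariant
lemma aLoop_inv (s : List Char) :
    ∀ (t p : List Char) (i last : Int) (lastN : Nat) (acc : List Char),
    s = p ++ t → i = p.length → last = lastN → lastN ≤ p.length →
    acc ++ (s.drop lastN).take (p.length - lastN) = pvDbl p →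
    (let st := t.foldl (makeStorableStep s) (i, last, acc);
     st.2.2 ++ PySem.List.slice s (some st.2.1) (some (s.length : Int))) = pvDbl s := by
  intro t
  induction t with
  | nil =>
    intro p i last lastN acc hs hi hlast hl hinv
    simp only [List.foldl_nil]
    rw [hlast, PySem.List.slice_toNat s (by positivity) (by positivity)]
    simp only [Int.toNat_natCast]
    subst hs
    simpa using hinv
  | cons c t ih =>
    intro p i last lastN acc hs hi hlast hl hinv
    simp only [List.foldl_cons, makeStorableStep]
    by_cases hc : c = '\''
    · rw [if_pos hc]
      have hsl : PySem.List.slice s (some last) (some (i + 1))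
          = (s.drop lastN).take (p.length + 1 - lastN) := by
        rw [hlast, hi, show ((p.length : Int) + 1) = ((p.length + 1 : Nat) : Int) from by push_cast; ring,
            PySem.List.slice_toNat s (by positivity) (by positivity)]
        simp
      refine ih (p ++ [c]) (i + 1) (i + 1) (p.length + 1)
        (acc ++ PySem.List.slice s (some last) (some (i + 1)) ++ ['\''])
        (by simpa using hs) (by rw [hi]; simp) (by rw [hi]; push_cast; ring)
        (by simp) ?_
      have hts : (s.drop lastN).take (p.length + 1 - lastN)
          = (s.drop lastN).take (p.length - lastN) ++ [c] := by
        rw [show p.length + 1 - lastN = p.length - lastN + 1 from by omega, hs]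
        exact take_succ_prefix p t c lastN hl
      rw [hsl, hts, show (p ++ [c]).length - (p.length + 1) = 0 from by simp]
      simp only [List.take_zero, List.append_nil]
      rw [← List.append_assoc] at *
      rw [hinv]
      simp [pvDbl, hc]
    · rw [if_neg hc]
      refine ih (p ++ [c]) (i + 1) last lastN acc
        (by simpa using hs) (by rw [hi]; simp) hlast
        (by simp; omega) ?_
      have hts : (s.drop lastN).take ((p ++ [c]).length - lastN)
          = (s.drop lastN).take (p.length - lastN) ++ [c] := by
        simp only [List.length_append, List.length_cons, List.length_nil, Nat.zero_add]
        rw [show p.length + 1 - lastN = p.length - lastN + 1 from by omega, hs]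
        exact take_succ_prefix p t c lastN hl
      rw [hts, ← List.append_assoc, hinv]
      simp [pvDbl, hc]

lemma makeStorable_eq_dbl (string : String) :
    makeStorable string = String.ofList (pvDbl string.toList) := by
  unfold makeStorable
  have := aLoop_inv string.toList string.toList [] 0 0 0 []
    (by simp) (by simp) (by simp) (by simp) (by simp [pvDbl])
  exact congrArg String.ofList this

lemma makeStorable_alt_eq_dbl (string : String) :
    makeStorable_alt string = String.ofList (pvDbl string.toList) := by
  unfold makeStorable_alt
  rw [show ("'".toList) = ['\''] from rfl, show ("''".toList) = ['\'', '\''] from rfl,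
      splitOn_eq_pvSplitQ, join_pvSplitQ]

-- ===== VERDICT (by name: the statement is the Claim_ definition above) =====
theorem makeStorable_spec : Claim_equal_makeStorable := by
  intro string _
  unfold Spec_makeStorable
  rw [makeStorable_eq_dbl, makeStorable_alt_eq_dbl]
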